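-- pv_equiv track=rewrite | github.com/zuquan-song/leetcode | python/tigergraph/__init__.py | prison
-- ===== SOURCE A (Python) =====
-- def prison(n, m, h, v):
--     hset = set(h)
--     vset = set(v)
--
--     l, mxh = 0, 1
--     for i in range(1, n+2):
--         if i not in hset or i == n:
--             mxh = max(mxh, i - l)
--             l = i
--
--     u, mxv = 0, 1
--     for i in range(1, m+2):
--         if i not in vset or i == m:
--             mxv = max(mxv, i - u)
--             u = i
--     return mxh * mxv
-- ===== SOURCE B (Python) =====
-- def prison(n, m, h, v):
--     def axis(cuts, bound):
--         # pieces along one axis: 1 + longest run of consecutive cut lines strictly inside (0, bound)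
--         pts = sorted({x for x in cuts if 1 <= x <= bound - 1})
--         best, run, prev = 0, 0, None
--         for x in pts:
--             run = run + 1 if prev is not None and x == prev + 1 else 1
--             best = max(best, run)
--             prev = x
--         return best + 1
--     return axis(h, n) * axis(v, m)
-- ===== Notes on version B (the rewrite author's own statement) =====
-- stated objective: faster
-- what changed: Instead of scanning every grid line i in range(1, n+2) against a hash set, B sorts the deduplicated in-range cut positions per axis and finds the longest run of consecutive integers in one scan of that sorted list, returning (run+1) per axis.
import Mathlib
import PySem

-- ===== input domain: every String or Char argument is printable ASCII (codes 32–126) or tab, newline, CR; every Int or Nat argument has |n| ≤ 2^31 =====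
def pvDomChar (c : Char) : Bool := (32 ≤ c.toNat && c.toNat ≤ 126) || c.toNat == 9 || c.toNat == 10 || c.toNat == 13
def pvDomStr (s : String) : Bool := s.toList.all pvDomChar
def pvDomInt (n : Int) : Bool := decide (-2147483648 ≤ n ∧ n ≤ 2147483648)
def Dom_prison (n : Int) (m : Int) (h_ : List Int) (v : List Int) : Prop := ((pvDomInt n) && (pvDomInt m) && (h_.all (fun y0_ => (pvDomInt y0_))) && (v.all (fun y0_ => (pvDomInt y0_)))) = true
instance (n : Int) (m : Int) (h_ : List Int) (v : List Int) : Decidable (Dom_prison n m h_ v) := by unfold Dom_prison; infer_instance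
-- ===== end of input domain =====

-- B replaces A's scan over all grid lines 1..n+1 (resp. 1..m+1) by sorting the
-- deduplicated in-range cut positions and finding the longest consecutive run in
-- one scan of that sorted list (objective: faster).

-- ===== PORT A =====
-- loop body of A's two identical for-loops: "if i not in set or i == n: mx = max(mx, i-l); l = i"
def prisonStep (n : Int) (s : PySem.Set Int) (st : Int × Int) (i : Int) : Int × Int :=
  if ¬ (PySem.Set.contains s i = true) ∨ i = n then (i, max st.2 (i - st.1)) else st

def prison (n : Int) (m : Int) (h_ : List Int) (v : List Int) : Int :=
  let hset : PySem.Set Int := PySem.Set.ofList h_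
  let vset : PySem.Set Int := PySem.Set.ofList v
  let p1 := (PySem.List.pyRange 1 (n+2) 1).foldl (prisonStep n hset) (0, 1)
  let p2 := (PySem.List.pyRange 1 (m+2) 1).foldl (prisonStep m vset) (0, 1)
  p1.2 * p2.2

-- ===== PORT B =====
-- loop body of Source B's scan of the sorted cut positions, state (best, run, prev)
def axisStep (st : Int × Int × Option Int) (x : Int) : Int × Int × Option Int :=
  let run : Int := match st.2.2 with
    | some p => if x = p + 1 then st.2.1 + 1 else 1
    | none => 1
  (max st.1 run, run, some x)

-- Source B's inner helper axis(cuts, bound)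
def axisAlt (cuts : List Int) (bound : Int) : Int :=
  let pts := PySem.List.sorted (PySem.Set.ofList (cuts.filter (fun x => decide (1 ≤ x ∧ x ≤ bound - 1)))) (fun x => x) false
  let st := pts.foldl axisStep (0, 0, none)
  st.1 + 1

def prison_alt (n : Int) (m : Int) (h_ : List Int) (v : List Int) : Int :=
  axisAlt h_ n * axisAlt v m

-- ===== PRECONDITION & SPEC =====
def Spec_prison (n : Int) (m : Int) (h_ : List Int) (v : List Int) (out : Int) : Prop := out = prison_alt n m h_ v
instance (n : Int) (m : Int) (h_ : List Int) (v : List Int) (out : Int) : Decidable (Spec_prison n m h_ v out) := by unfold Spec_prison; infer_instance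

-- ===== CLAIM (what is proved, stated in full; the proofs are below) =====
def Claim_equal_prison : Prop := ∀ (n : Int) (m : Int) (h_ : List Int) (v : List Int), Dom_prison n m h_ v → Spec_prison n m h_ v (prison n m h_ v)

-- ===== LEMMAS AND PROOFS =====

-- Positions are the grid lines 1, 2, 3, …; Q says whether a position is a cut.
-- rq Q k = length of the run of consecutive Q-positions ending at k
def rq (Q : Int → Bool) : Nat → Int
  | 0 => 0
  | k+1 => if Q ((k : Int) + 1) then rq Q k + 1 else 0

-- mfl Q k = best run among runs already closed by a non-Q position ≤ k
def mfl (Q : Int → Bool) : Nat → Int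
  | 0 => 0
  | k+1 => if Q ((k : Int) + 1) then mfl Q k else max (mfl Q k) (rq Q k)

-- mr Q k = longest run of consecutive Q-positions within [1, k]
def mr (Q : Int → Bool) : Nat → Int
  | 0 => 0
  | k+1 => max (mr Q k) (rq Q (k+1))

-- lastMem Q k = last Q-position ≤ k, if any
def lastMem (Q : Int → Bool) : Nat → Option Int
  | 0 => none
  | k+1 => if Q ((k : Int) + 1) then some ((k : Int) + 1) else lastMem Q k

-- lastRun Q k = length of the run ending at that last Q-position
def lastRun (Q : Int → Bool) : Nat → Int
  | 0 => 0
  | k+1 => if Q ((k : Int) + 1) then rq Q (k+1) else lastRun Q k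

theorem contains_ofList_eq (cuts : List Int) (x : Int) :
    (PySem.Set.contains (PySem.Set.ofList cuts) x = true) ↔ x ∈ cuts := by
  rw [PySem.Set.contains_iff, PySem.Set.mem_ofList]

theorem rq_nonneg (Q : Int → Bool) (k : Nat) : 0 ≤ rq Q k := by
  induction k with
  | zero => simp [rq]
  | succ k ih => simp only [rq]; split <;> omega

theorem mfl_nonneg (Q : Int → Bool) (k : Nat) : 0 ≤ mfl Q k := by
  induction k with
  | zero => simp [mfl]
  | succ k ih => simp only [mfl]; split <;> [exact ih; exact le_max_of_le_left ih]

theorem mr_nonneg (Q : Int → Bool) (k : Nat) : 0 ≤ mr Q k := by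
  induction k with
  | zero => simp [mr]
  | succ k ih => simp only [mr]; exact le_max_of_le_left ih

theorem mr_eq_max (Q : Int → Bool) (k : Nat) : mr Q k = max (mfl Q k) (rq Q k) := by
  induction k with
  | zero => simp [mr, mfl, rq]
  | succ k ih =>
    simp only [mr, mfl, rq, ih]
    by_cases hq : Q ((k : Int) + 1) = true <;> simp [hq]

theorem lastMem_le (Q : Int → Bool) (k : Nat) (p : Int) (hp : lastMem Q k = some p) : p ≤ (k : Int) := by
  induction k with
  | zero => simp [lastMem] at hp
  | succ k ih =>
    simp only [lastMem] at hp
    split at hp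
    · cases hp; push_cast; omega
    · have := ih hp; push_cast; omega

theorem lastMem_or_rq_zero (Q : Int → Bool) (k : Nat) :
    lastMem Q k = some (k : Int) ∨ rq Q k = 0 := by
  cases k with
  | zero => right; rfl
  | succ k =>
    by_cases hq : Q ((k : Int) + 1) = true
    · left; simp [lastMem, hq]
    · right; simp [rq, hq]

theorem lastRun_of_lastMem_self (Q : Int → Bool) (k : Nat) (h : lastMem Q k = some (k : Int)) :
    lastRun Q k = rq Q k := by
  cases k with
  | zero => simp [lastMem] at h
  | succ k =>
    by_cases hq : Q ((k : Int) + 1) = true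
    · simp [lastRun, hq]
    · exfalso
      simp only [lastMem, hq] at h
      simp at h
      have := lastMem_le Q k _ h
      push_cast at this h ⊢
      omega

-- ===== A-side characterisation: the state of A's loop after the first k positions =====
theorem prisonA_prefix (n : Int) (cuts : List Int) (k : Nat) (hk : (k : Int) ≤ n - 1) :
    (PySem.List.pyRange 1 ((k : Int) + 1) 1).foldl (prisonStep n (PySem.Set.ofList cuts)) (0, 1)
      = ((k : Int) - rq (fun i => decide (i ∈ cuts)) k, 1 + mfl (fun i => decide (i ∈ cuts)) k) := by
  induction k with
  | zero =>
    rw [show ((0:Nat):Int) + 1 = 1 by norm_num, PySem.List.pyRange_one_eq_nil le_rfl]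
    simp [rq, mfl]
  | succ k ih =>
    have hc : ((k+1:Nat):Int) = (k:Int) + 1 := by push_cast; ring
    rw [hc] at hk ⊢
    rw [PySem.List.pyRange_one_succ_right (by omega : (1:Int) ≤ (k:Int)+1), List.foldl_append,
        ih (by omega)]
    simp only [List.foldl_cons, List.foldl_nil, prisonStep]
    have hne : ¬ ((k:Int) + 1 = n) := by omega
    by_cases hx : ((k:Int)+1) ∈ cuts
    · rw [if_neg]
      · simp only [rq, mfl, hx]
        simp
      · rw [contains_ofList_eq]
        simp [hx, hne]
    · rw [if_pos]
      · simp only [rq, mfl, hx]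
        simp
      · left; rw [contains_ofList_eq]; simp [hx]

-- A's per-axis loop computes 1 + (longest run of consecutive cuts inside [1, n-1])
theorem prisonA_axis (n : Int) (cuts : List Int) :
    ((PySem.List.pyRange 1 (n + 2) 1).foldl (prisonStep n (PySem.Set.ofList cuts)) (0, 1)).2
      = 1 + mr (fun i => decide (i ∈ cuts)) (n - 1).toNat := by
  by_cases hn : 1 ≤ n
  · have hN : ((n-1).toNat : Int) = n - 1 := Int.toNat_of_nonneg (by omega)
    rw [PySem.List.pyRange_one_append 1 n (n+2) (by omega) (by omega),
        PySem.List.pyRange_one_cons (by omega : n < n + 2),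
        show PySem.List.pyRange (n+1) (n+2) 1 = [n+1] from by
          rw [show n+2 = (n+1)+1 by ring]; exact PySem.List.pyRange_one_singleton _,
        List.foldl_append]
    rw [show PySem.List.pyRange 1 n 1 = PySem.List.pyRange 1 (((n-1).toNat : Int) + 1) 1 from by
          rw [hN]; ring_nf]
    rw [prisonA_prefix n cuts (n-1).toNat (by omega)]
    simp only [List.foldl_cons, List.foldl_nil]
    rw [show prisonStep n (PySem.Set.ofList cuts)
          (((n-1).toNat : Int) - rq (fun i => decide (i ∈ cuts)) (n-1).toNat,
           1 + mfl (fun i => decide (i ∈ cuts)) (n-1).toNat) n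
        = (n, 1 + mr (fun i => decide (i ∈ cuts)) (n-1).toNat) from by
      unfold prisonStep
      rw [if_pos (Or.inr rfl)]
      have h1 := rq_nonneg (fun i => decide (i ∈ cuts)) (n-1).toNat
      have h2 := mfl_nonneg (fun i => decide (i ∈ cuts)) (n-1).toNat
      rw [mr_eq_max]
      simp only [Prod.mk.injEq]
      refine ⟨trivial, ?_⟩
      omega]
    unfold prisonStep
    have h3 := mr_nonneg (fun i => decide (i ∈ cuts)) (n-1).toNat
    split
    · show max (1 + mr (fun i => decide (i ∈ cuts)) (n-1).toNat) (n + 1 - n)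
          = 1 + mr (fun i => decide (i ∈ cuts)) (n-1).toNat
      omega
    · rfl
  · have h0 : (n-1).toNat = 0 := by omega
    rw [h0]
    by_cases hn0 : n = 0
    · subst hn0
      rw [show (0:Int)+2 = 1+1 by ring, PySem.List.pyRange_one_singleton]
      simp only [List.foldl_cons, List.foldl_nil, prisonStep]
      split
      · simp [mr]
      · simp [mr]
    · rw [PySem.List.pyRange_one_eq_nil (by omega)]
      simp [mr]

-- ===== B-side characterisation =====
-- sorted(set(filtered cuts)) is the increasing list of cut positions inside [1, n-1]
theorem axisB_sorted (n : Int) (cuts : List Int) :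
    PySem.List.sorted (PySem.Set.ofList (cuts.filter (fun x => decide (1 ≤ x ∧ x ≤ n - 1)))) (fun x => x) false
      = (PySem.List.pyRange 1 n 1).filter (fun i => decide (i ∈ cuts)) := by
  apply PySem.List.sorted_eq_of_perm_of_pairwise_lt
  · rw [List.perm_ext_iff_of_nodup (List.Nodup.filter _ (PySem.List.nodup_pyRange_one 1 n))
        (PySem.Set.nodup_ofList _)]
    intro a
    rw [PySem.Set.mem_ofList, List.mem_filter, List.mem_filter, PySem.List.mem_pyRange_one]
    constructor
    · rintro ⟨⟨h1, h2⟩, h3⟩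
      exact ⟨by simpa using h3, by simp; omega⟩
    · rintro ⟨h3, h12⟩
      simp at h12
      exact ⟨⟨by omega, by omega⟩, by simpa using h3⟩
  · exact List.Pairwise.filter _ (PySem.List.pairwise_lt_pyRange_one 1 n)

-- B's scan of that list maintains (longest run so far, run at last cut, last cut)
theorem axisB_fold (cuts : List Int) (k : Nat) :
    ((PySem.List.pyRange 1 ((k : Int) + 1) 1).filter (fun i => decide (i ∈ cuts))).foldl axisStep (0, 0, none)
      = (mr (fun i => decide (i ∈ cuts)) k, lastRun (fun i => decide (i ∈ cuts)) k,
         lastMem (fun i => decide (i ∈ cuts)) k) := by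
  set Q : Int → Bool := fun i => decide (i ∈ cuts) with hQ
  induction k with
  | zero =>
    rw [show ((0:Nat):Int) + 1 = 1 by norm_num, PySem.List.pyRange_one_eq_nil le_rfl]
    simp [mr, lastRun, lastMem]
  | succ k ih =>
    have hc : ((k+1:Nat):Int) = (k:Int) + 1 := by push_cast; ring
    rw [hc]
    rw [PySem.List.pyRange_one_succ_right (by omega : (1:Int) ≤ (k:Int)+1), List.filter_append,
        List.foldl_append, ih]
    by_cases hq : Q ((k:Int) + 1) = true
    · rw [show List.filter Q [(k:Int)+1] = [(k:Int)+1] from by simp [hq]]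
      simp only [List.foldl_cons, List.foldl_nil]
      unfold axisStep
      rcases hlm : lastMem Q k with _ | p
      · -- no earlier cut: the new run has length 1
        have hrq : rq Q k = 0 := by
          rcases lastMem_or_rq_zero Q k with h | h
          · rw [hlm] at h; cases h
          · exact h
        have h1 : rq Q (k+1) = 1 := by simp [rq, hq, hrq]
        simp only [mr, lastRun, lastMem, hq, h1]
        simp
      · by_cases hpk : p = (k : Int)
        · -- the previous position was a cut: the run extends
          subst hpk
          have hlr := lastRun_of_lastMem_self Q k hlm
          have h1 : rq Q (k+1) = rq Q k + 1 := by simp [rq, hq]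
          simp only [hlr]
          simp only [mr, lastRun, lastMem, hq, h1]
          simp
        · -- gap since the last cut: a new run of length 1 starts
          have hrq : rq Q k = 0 := by
            rcases lastMem_or_rq_zero Q k with h | h
            · rw [hlm] at h; exact absurd (Option.some.inj h) hpk
            · exact h
          have hple := lastMem_le Q k p hlm
          have h1 : rq Q (k+1) = 1 := by simp [rq, hq, hrq]
          simp only [mr, lastRun, lastMem, hq, h1]
          rw [if_neg (by omega : ¬ ((k:Int) + 1 = p + 1))]
          simp
    · rw [show List.filter Q [(k:Int)+1] = [] from by simp [hq]]
      have hrq : rq Q (k+1) = 0 := by simp [rq, hq]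
      have hmr := mr_nonneg Q k
      simp only [List.foldl_nil, mr, lastRun, lastMem, hrq]
      simp [hq]
      omega

theorem axisB_axis (n : Int) (cuts : List Int) :
    axisAlt cuts n = mr (fun i => decide (i ∈ cuts)) (n - 1).toNat + 1 := by
  unfold axisAlt
  simp only []
  rw [axisB_sorted]
  by_cases hn : 1 ≤ n
  · have hN : ((n-1).toNat : Int) = n - 1 := Int.toNat_of_nonneg (by omega)
    rw [show PySem.List.pyRange 1 n 1 = PySem.List.pyRange 1 (((n-1).toNat:Int)+1) 1 from by
          rw [hN]; ring_nf]
    rw [axisB_fold]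
  · have h0 : (n-1).toNat = 0 := by omega
    rw [PySem.List.pyRange_one_eq_nil (by omega), h0]
    simp [mr]

theorem axis_eq (n : Int) (cuts : List Int) :
    ((PySem.List.pyRange 1 (n + 2) 1).foldl (prisonStep n (PySem.Set.ofList cuts)) (0, 1)).2
      = axisAlt cuts n := by
  rw [prisonA_axis, axisB_axis]; omega

-- ===== VERDICT (by name: the statement is the Claim_ definition above) =====
theorem prison_spec : Claim_equal_prison := by
  intro n m h_ v _
  show prison n m h_ v = prison_alt n m h_ v
  unfold prison prison_alt
  rw [← axis_eq n h_, ← axis_eq m v]
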